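-- pv_equiv track=rewrite | github.com/Davidkatom/Crosstalk | Ramsey_ExperimentV3.py | create_detuning_states
-- ===== SOURCE A (Python) =====
-- def create_detuning_states(n):
--     state_det_0_string = ""
--     state_det_1_string = ""
--     for i in range(n):
--         if i % 2 == 0:
--             state_det_0_string += "+"
--             # measurements_det_0.append(i)
--             state_det_1_string += "0"
--         else:
--             state_det_0_string += "0"
--             state_det_1_string += "+"
--             # measurements_det_1.append(i)
--
--     return state_det_0_string, state_det_1_string
-- ===== SOURCE B (Python) =====
-- def create_detuning_states(n):
--     k = (n + 1) // 2
--     return ("+0" * k)[:n], ("0+" * k)[:n]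
-- ===== Notes on version B (the rewrite author's own statement) =====
-- stated objective: simpler
-- what changed: Replaces the per-index loop with parity branches by string repetition of the two-character patterns '+0'/'0+' sliced to length n.
import Mathlib
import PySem

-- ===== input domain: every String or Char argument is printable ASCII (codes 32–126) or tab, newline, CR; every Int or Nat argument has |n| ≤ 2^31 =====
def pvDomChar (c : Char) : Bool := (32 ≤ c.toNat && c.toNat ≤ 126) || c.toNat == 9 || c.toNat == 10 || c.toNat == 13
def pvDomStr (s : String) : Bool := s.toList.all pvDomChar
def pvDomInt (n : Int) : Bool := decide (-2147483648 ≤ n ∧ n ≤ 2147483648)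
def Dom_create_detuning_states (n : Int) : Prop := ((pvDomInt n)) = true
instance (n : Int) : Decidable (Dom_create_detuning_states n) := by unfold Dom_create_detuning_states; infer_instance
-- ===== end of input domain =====

-- B replaces A's per-index loop by repeating the two-character patterns and slicing to length n (objective: simpler).

-- ===== PORT A =====
-- the loop over range(n), appending one char to each string per index
def create_detuning_states (n : Int) : String × String :=
  let p := (PySem.List.pyRange 0 n 1).foldl
    (fun (acc : List Char × List Char) i =>
      if PySem.Int.mod i 2 = 0 then (acc.1 ++ ['+'], acc.2 ++ ['0'])
      else (acc.1 ++ ['0'], acc.2 ++ ['+'])) ([], [])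
  (String.mk p.1, String.mk p.2)

-- ===== PORT B =====
-- ("+0" * ((n+1)//2))[:n] and ("0+" * ((n+1)//2))[:n]
def create_detuning_states_alt (n : Int) : String × String :=
  let k := PySem.Int.floordiv (n + 1) 2
  let s0 := (List.replicate k.toNat ['+', '0']).flatten
  let s1 := (List.replicate k.toNat ['0', '+']).flatten
  (String.mk (PySem.List.slice s0 none (some n)),
   String.mk (PySem.List.slice s1 none (some n)))

-- ===== PRECONDITION & SPEC =====
def Spec_create_detuning_states (n : Int) (out : String × String) : Prop := out = create_detuning_states_alt n
instance (n : Int) (out : String × String) : Decidable (Spec_create_detuning_states n out) := by unfold Spec_create_detuning_states; infer_instance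

-- ===== CLAIM (what is proved, stated in full; the proofs are below) =====
def Claim_equal_create_detuning_states : Prop := ∀ (n : Int), Dom_create_detuning_states n → Spec_create_detuning_states n (create_detuning_states n)

-- ===== LEMMAS AND PROOFS =====

def pvF0 (i : Nat) : Char := if i % 2 = 0 then '+' else '0'
def pvF1 (i : Nat) : Char := if i % 2 = 0 then '0' else '+'

lemma pv_flatten0 (k : Nat) :
    (List.replicate k ['+', '0']).flatten = (List.range (2 * k)).map pvF0 := by
  induction k with
  | zero => simp
  | succ k ih =>
      rw [List.replicate_succ', List.flatten_append, ih]
      have h2 : 2 * (k + 1) = (2 * k) + 1 + 1 := by omega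
      rw [h2, List.range_succ, List.range_succ]
      have e0 : pvF0 (2 * k) = '+' := by simp [pvF0, Nat.mul_mod_right]
      have e1 : pvF0 (2 * k + 1) = '0' := by
        have : (2 * k + 1) % 2 = 1 := by omega
        simp [pvF0, this]
      simp [e0, e1]

lemma pv_flatten1 (k : Nat) :
    (List.replicate k ['0', '+']).flatten = (List.range (2 * k)).map pvF1 := by
  induction k with
  | zero => simp
  | succ k ih =>
      rw [List.replicate_succ', List.flatten_append, ih]
      have h2 : 2 * (k + 1) = (2 * k) + 1 + 1 := by omega
      rw [h2, List.range_succ, List.range_succ]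
      have e0 : pvF1 (2 * k) = '0' := by simp [pvF1, Nat.mul_mod_right]
      have e1 : pvF1 (2 * k + 1) = '+' := by
        have : (2 * k + 1) % 2 = 1 := by omega
        simp [pvF1, this]
      simp [e0, e1]

lemma pv_fold (m : Nat) :
    (PySem.List.pyRange 0 (m : Int) 1).foldl
      (fun (acc : List Char × List Char) i =>
        if PySem.Int.mod i 2 = 0 then (acc.1 ++ ['+'], acc.2 ++ ['0'])
        else (acc.1 ++ ['0'], acc.2 ++ ['+'])) ([], [])
      = ((List.range m).map pvF0, (List.range m).map pvF1) := by
  induction m with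
  | zero => simp [PySem.List.pyRange_one_eq_nil]
  | succ m ih =>
      have hc : ((m : Int) + 1) = ((m + 1 : Nat) : Int) := by push_cast; ring
      rw [← hc, PySem.List.pyRange_one_succ_right (by positivity), List.foldl_append, ih]
      have hm : PySem.Int.mod (m : Int) 2 = ((m % 2 : Nat) : Int) := by
        exact_mod_cast PySem.Int.mod_natCast m 2
      rw [List.range_succ]
      by_cases h : m % 2 = 0
      · simp only [List.foldl_cons, List.foldl_nil, hm, h]
        simp [pvF0, pvF1, h]
      · have h1 : m % 2 = 1 := by omega
        simp only [List.foldl_cons, List.foldl_nil, hm, h1]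
        simp [pvF0, pvF1, h]

lemma pv_main (n : Int) : create_detuning_states n = create_detuning_states_alt n := by
  unfold create_detuning_states create_detuning_states_alt
  dsimp only
  by_cases hn : n ≤ 0
  · have hr : PySem.List.pyRange 0 n 1 = [] := PySem.List.pyRange_one_eq_nil hn
    have hk : (PySem.Int.floordiv (n + 1) 2).toNat = 0 := by
      have : PySem.Int.floordiv (n + 1) 2 < 1 :=
        (PySem.Int.floordiv_lt_iff_lt_mul (by omega)).2 (by omega)
      omega
    rw [hr, hk]
    simp [PySem.List.slice]
  · push_neg at hn
    have hmn : n = ((n.toNat : Nat) : Int) := by omega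
    set m := n.toNat with hm
    have hk : PySem.Int.floordiv (n + 1) 2 = ((m + 1) / 2 : Nat) := by
      have h1 : n + 1 = ((m + 1 : Nat) : Int) := by omega
      rw [h1]
      exact_mod_cast PySem.Int.floordiv_natCast (m + 1) 2
    have hkt : (PySem.Int.floordiv (n + 1) 2).toNat = (m + 1) / 2 := by omega
    have hle : m ≤ 2 * ((m + 1) / 2) := by omega
    rw [hkt, pv_flatten0, pv_flatten1, hmn, pv_fold,
      PySem.List.slice_to _ (by omega), PySem.List.slice_to _ (by omega)]
    have ht : (((m : Int)).toNat) = m := by omega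
    rw [ht]
    simp [← List.map_take, List.take_range, Nat.min_eq_left hle]

-- ===== VERDICT (by name: the statement is the Claim_ definition above) =====
theorem create_detuning_states_spec : Claim_equal_create_detuning_states := by
  intro n _
  unfold Spec_create_detuning_states
  exact pv_main n
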